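-- pv_equiv track=rewrite | github.com/nicksowl/BLASTtv-CS-Match-Log-Analyser | src/blastlog/extend_round_events.py | compute_round_mvp
-- ===== SOURCE A (Python) =====
-- from typing import Any, Iterable, Optional, TypedDict
--
-- class KillEvent(TypedDict):
--     time: Optional[str]     # "HH:MM:SS"
--     killed_by: str
--     killed: str
--     weapon: str
--     is_headshot: bool
--
-- def compute_round_mvp(kill_events: list[KillEvent]) -> tuple[Optional[str], int]:
--     counts: dict[str, int] = {}
--     best_player: Optional[str] = None
--     best_kills = 0
--
--     for ev in kill_events:
--         killer = ev["killed_by"]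
--         counts[killer] = counts.get(killer, 0) + 1
--         if counts[killer] > best_kills:
--             best_kills = counts[killer]
--             best_player = killer
--
--     return best_player, best_kills
-- ===== SOURCE B (Python) =====
-- from typing import Optional
--
--
-- def compute_round_mvp(kill_events) -> tuple[Optional[str], int]:
--     # Pass 1: tally all kills.
--     counts: dict[str, int] = {}
--     for ev in kill_events:
--         k = ev["killed_by"]
--         counts[k] = counts.get(k, 0) + 1
--     if not counts:
--         return None, 0
--     max_kills = max(counts.values())
--     # Pass 2: the MVP is the first player whose running count reaches max_kills.
--     running: dict[str, int] = {}
--     for ev in kill_events: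
--         k = ev["killed_by"]
--         c = running.get(k, 0) + 1
--         if c == max_kills:
--             return k, max_kills
--         running[k] = c
--     return None, max_kills  # unreachable: some player reaches max_kills
-- ===== Notes on version B (the rewrite author's own statement) =====
-- stated objective: alternative
-- what changed: Replaces A's single pass with an interleaved running-max update by a two-pass structure: first tally all kills and take the global maximum, then rescan to find the first player whose running count reaches it (same first-to-reach tie-break).
import Mathlib
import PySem

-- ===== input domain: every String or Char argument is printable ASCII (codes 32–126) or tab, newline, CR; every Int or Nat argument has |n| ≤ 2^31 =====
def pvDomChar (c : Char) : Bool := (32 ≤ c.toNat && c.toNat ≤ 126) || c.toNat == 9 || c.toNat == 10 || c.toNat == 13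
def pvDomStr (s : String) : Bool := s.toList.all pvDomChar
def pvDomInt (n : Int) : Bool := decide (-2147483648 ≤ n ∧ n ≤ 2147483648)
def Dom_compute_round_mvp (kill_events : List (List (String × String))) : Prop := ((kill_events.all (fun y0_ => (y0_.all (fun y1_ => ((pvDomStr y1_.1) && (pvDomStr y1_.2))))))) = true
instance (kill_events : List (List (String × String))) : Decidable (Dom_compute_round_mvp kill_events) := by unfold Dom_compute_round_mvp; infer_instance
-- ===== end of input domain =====

-- B replaces A's single pass (running max interleaved with the tally) by two passes: tally
-- everything, take the global max, then find the first player to reach it. Equal return values;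
-- no argument is mutated.

-- ev["killed_by"] : dict lookup on the event (first match); default "" is never used inside Pre_.
def pvKey (ev : List (String × String)) : String :=
  ((PySem.Dict.mk ev).get? "killed_by").getD ""

-- ===== PORT A =====
def compute_round_mvp (kill_events : List (List (String × String))) : Option String × Int :=
  let st := kill_events.foldl
    (fun (st : PySem.Dict String Int × Option String × Int) ev =>
      let killer := pvKey ev
      let c := st.1.getD killer 0 + 1
      let counts := st.1.insert killer c
      if c > st.2.2 then (counts, some killer, c) else (counts, st.2.1, st.2.2))
    (PySem.Dict.empty, none, 0)
  (st.2.1, st.2.2)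

-- ===== PORT B =====
def pvAltScan (m : Int) (evs : List (List (String × String))) (running : PySem.Dict String Int) :
    Option String × Int :=
  match evs with
  | [] => (none, m)  -- unreachable in B: some player reaches m
  | ev :: rest =>
    let k := pvKey ev
    let c := running.getD k 0 + 1
    if c = m then (some k, m) else pvAltScan m rest (running.insert k c)

def compute_round_mvp_alt (kill_events : List (List (String × String))) : Option String × Int :=
  let counts := kill_events.foldl
    (fun (d : PySem.Dict String Int) ev => d.insert (pvKey ev) (d.getD (pvKey ev) 0 + 1))
    PySem.Dict.empty
  if counts.items = [] then (none, 0)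
  else
    match PySem.List.max? counts.values (fun v => v) with
    | none => (none, 0)  -- unreachable: counts is nonempty
    | some m => pvAltScan m kill_events PySem.Dict.empty

-- ===== PRECONDITION & SPEC =====
-- Pre_ excludes exactly the events without a "killed_by" key, on which Python A raises KeyError.
def Pre_compute_round_mvp (kill_events : List (List (String × String))) : Prop :=
  ∀ ev ∈ kill_events, ((PySem.Dict.mk ev).get? "killed_by").isSome = true
instance (kill_events : List (List (String × String))) : Decidable (Pre_compute_round_mvp kill_events) := by unfold Pre_compute_round_mvp; infer_instance

def pvWitness_compute_round_mvp : (List (List (String × String))) :=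
  [[("killed_by", "alice")], [("killed_by", "bob")], [("killed_by", "alice")]]

def Spec_compute_round_mvp (kill_events : List (List (String × String))) (out : Option String × Int) : Prop := out = compute_round_mvp_alt kill_events
instance (kill_events : List (List (String × String))) (out : Option String × Int) : Decidable (Spec_compute_round_mvp kill_events out) := by unfold Spec_compute_round_mvp; infer_instance

-- ===== CLAIM (what is proved, stated in full; the proofs are below) =====
def Claim_equal_compute_round_mvp : Prop := ∀ (kill_events : List (List (String × String))), Dom_compute_round_mvp kill_events → Pre_compute_round_mvp kill_events → Spec_compute_round_mvp kill_events (compute_round_mvp kill_events)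

-- ===== LEMMAS AND PROOFS =====

-- Proof-side: everything over the list of killer names xs = kill_events.map pvKey.

def pvCnt (xs : List String) (d : PySem.Dict String Int) : PySem.Dict String Int :=
  xs.foldl (fun d k => d.insert k (d.getD k 0 + 1)) d

def pvAStep (st : PySem.Dict String Int × Option String × Int) (k : String) :
    PySem.Dict String Int × Option String × Int :=
  let c := st.1.getD k 0 + 1
  let counts := st.1.insert k c
  if c > st.2.2 then (counts, some k, c) else (counts, st.2.1, st.2.2)

def pvAFold (xs : List String) : PySem.Dict String Int × Option String × Int :=
  xs.foldl pvAStep (PySem.Dict.empty, none, 0)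

def pvFind (m : Int) (xs : List String) (r : PySem.Dict String Int) : Option String :=
  match xs with
  | [] => none
  | k :: t =>
    let c := r.getD k 0 + 1
    if c = m then some k else pvFind m t (r.insert k c)

lemma portA_eq (l : List (List (String × String))) :
    compute_round_mvp l = ((pvAFold (l.map pvKey)).2.1, (pvAFold (l.map pvKey)).2.2) := by
  simp [compute_round_mvp, pvAFold, pvAStep, List.foldl_map]

lemma portB_cnt (l : List (List (String × String))) :
    l.foldl (fun (d : PySem.Dict String Int) ev => d.insert (pvKey ev) (d.getD (pvKey ev) 0 + 1))
      PySem.Dict.empty = pvCnt (l.map pvKey) PySem.Dict.empty := by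
  simp [pvCnt, List.foldl_map]

lemma portB_scan (m : Int) (l : List (List (String × String))) (r : PySem.Dict String Int) :
    pvAltScan m l r = (pvFind m (l.map pvKey) r, m) := by
  induction l generalizing r with
  | nil => rfl
  | cons ev rest ih =>
    simp only [pvAltScan, pvFind, List.map_cons]
    split_ifs <;> simp [ih]

lemma pvCnt_getD (xs : List String) (d : PySem.Dict String Int) (k : String) :
    (pvCnt xs d).getD k 0 = d.getD k 0 + xs.count k := by
  simpa [pvCnt] using PySem.Dict.getD_foldl_insert_add_one xs d k

lemma pvCnt_counter (xs : List String) :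
    pvCnt xs PySem.Dict.empty = PySem.Dict.counter xs := by
  simpa [pvCnt] using PySem.Dict.foldl_insert_getD_add_one_eq_counter xs

-- max(xs) for Int lists: any upper bound that is a member is the max
lemma max?_eq_of_mem_of_le (xs : List Int) (m : Int) (hm : m ∈ xs)
    (hub : ∀ x ∈ xs, x ≤ m) : PySem.List.max? xs (fun v => v) = some m := by
  cases xs with
  | nil => cases hm
  | cons x t =>
    rw [PySem.List.max?_id_cons]
    have h1 := (PySem.List.le_foldl_max t x).1
    have h2 := (PySem.List.le_foldl_max t x).2
    have hmem : t.foldl max x = x ∨ t.foldl max x ∈ t := PySem.List.foldl_max_mem t x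
    have hle : t.foldl max x ≤ m := by
      rcases hmem with h | h
      · rw [h]; exact hub x List.mem_cons_self
      · exact hub _ (List.mem_cons_of_mem _ h)
    have hge : m ≤ t.foldl max x := by
      rcases List.mem_cons.mp hm with h | h
      · rw [h]; exact h1
      · exact h2 m h
    exact congrArg some (le_antisymm hle hge)

-- pvFind over an appended list
lemma pvFind_append (m : Int) (xs ys : List String) (r : PySem.Dict String Int) :
    pvFind m (xs ++ ys) r =
      ((pvFind m xs r).orElse (fun _ => pvFind m ys (pvCnt xs r))) := by
  induction xs generalizing r with
  | nil => simp [pvFind, pvCnt]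
  | cons k t ih =>
    simp only [List.cons_append, pvFind]
    split_ifs with h
    · rfl
    · simpa [pvCnt] using ih (r.insert k (r.getD k 0 + 1))

-- pvFind never fires when every total count stays below m
lemma pvFind_none (m : Int) (xs : List String) (r : PySem.Dict String Int)
    (h : ∀ k ∈ xs, r.getD k 0 + xs.count k < m) : pvFind m xs r = none := by
  induction xs generalizing r with
  | nil => rfl
  | cons k t ih =>
    have hk := h k List.mem_cons_self
    have hckk : (k :: t).count k = t.count k + 1 := by simp
    rw [hckk] at hk; push_cast at hk
    simp only [pvFind]
    rw [if_neg (by omega)]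
    apply ih
    intro k' hk'
    by_cases hkk : k' = k
    · subst hkk
      rw [PySem.Dict.getD_insert_self]
      omega
    · have h2 := h k' (List.mem_cons_of_mem _ hk')
      have hcnt : (k :: t).count k' = t.count k' := by
        simp [Ne.symm hkk]
      rw [hcnt] at h2
      rw [PySem.Dict.getD_insert_of_ne _ _ _ hkk]
      omega

-- Main invariant of A's fold, proved by induction from the right.
lemma pvAFold_append (xs : List String) (a : String) :
    pvAFold (xs ++ [a]) = pvAStep (pvAFold xs) a := by
  simp [pvAFold, List.foldl_append]

lemma pvCnt_append (xs : List String) (a : String) :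
    pvCnt (xs ++ [a]) PySem.Dict.empty =
      (pvCnt xs PySem.Dict.empty).insert a ((pvCnt xs PySem.Dict.empty).getD a 0 + 1) := by
  simp [pvCnt, List.foldl_append]

-- Main invariant of A's fold, proved by induction from the right.
lemma main_inv (xs : List String) :
    (pvAFold xs).1 = pvCnt xs PySem.Dict.empty ∧
    (∀ k, (xs.count k : Int) ≤ (pvAFold xs).2.2) ∧
    (xs = [] → (pvAFold xs).2 = (none, 0)) ∧
    (xs ≠ [] →
      (∃ k ∈ xs, (xs.count k : Int) = (pvAFold xs).2.2) ∧
      (pvAFold xs).2.1.isSome = true ∧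
      pvFind (pvAFold xs).2.2 xs PySem.Dict.empty = (pvAFold xs).2.1) := by
  induction xs using List.reverseRecOn with
  | nil =>
    refine ⟨rfl, ?_, fun _ => rfl, fun h => absurd rfl h⟩
    intro k; simp [pvAFold]
  | append_singleton xs a ih =>
    obtain ⟨h1, h2, h3, h4⟩ := ih
    have hgetD : (pvAFold xs).1.getD a 0 = (xs.count a : Int) := by
      rw [h1, pvCnt_getD]; simp
    have hca : (xs ++ [a]).count a = xs.count a + 1 := by simp
    have hcne : ∀ k, k ≠ a → (xs ++ [a]).count k = xs.count k := by
      intro k hk; simp [List.count_append, Ne.symm hk]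
    rw [pvAFold_append]
    unfold pvAStep
    rw [hgetD]
    by_cases hgt : (xs.count a : Int) + 1 > (pvAFold xs).2.2
    · rw [if_pos hgt]
      dsimp only
      refine ⟨?_, ?_, ?_, ?_⟩
      · rw [pvCnt_append, ← h1, hgetD]
      · intro k
        by_cases hk : k = a
        · subst hk; rw [hca]; push_cast; omega
        · rw [hcne k hk]; have := h2 k; omega
      · intro h; simp at h
      · intro _
        refine ⟨⟨a, by simp, by rw [hca]; push_cast; ring⟩, rfl, ?_⟩
        rw [pvFind_append]
        have hnone : pvFind ((xs.count a : Int) + 1) xs PySem.Dict.empty = none := by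
          apply pvFind_none
          intro k hk
          have := h2 k
          simp only [PySem.Dict.getD_empty]
          omega
        rw [hnone]
        simp [pvFind, pvCnt_getD]
    · rw [if_neg hgt]
      dsimp only
      have hxs : xs ≠ [] := by
        intro h; subst h
        simp [pvAFold] at hgt
      obtain ⟨⟨k0, hk0mem, hk0⟩, hsome, hfind⟩ := h4 hxs
      have hk0a : k0 ≠ a := by
        intro h; subst h
        rw [hk0] at hgt
        have : (xs.count k0 : Int) ≤ (pvAFold xs).2.2 := h2 k0
        omega
      refine ⟨?_, ?_, ?_, ?_⟩
      · rw [pvCnt_append, ← h1, hgetD]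
      · intro k
        by_cases hk : k = a
        · subst hk; rw [hca]; push_cast; omega
        · rw [hcne k hk]; exact h2 k
      · intro h; simp at h
      · intro _
        refine ⟨⟨k0, by simp [List.mem_append.mpr (Or.inl hk0mem)], by rw [hcne k0 hk0a]; exact hk0⟩, hsome, ?_⟩
        rw [pvFind_append, hfind]
        obtain ⟨p, hp⟩ := Option.isSome_iff_exists.mp hsome
        rw [hp]
        rfl

lemma altB_eq (l : List (List (String × String))) (hnil : l ≠ []) :
    compute_round_mvp_alt l = ((pvAFold (l.map pvKey)).2.1, (pvAFold (l.map pvKey)).2.2) := by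
  obtain ⟨h1, h2, h3, h4⟩ := main_inv (l.map pvKey)
  obtain ⟨⟨k0, hk0mem, hk0⟩, hsome, hfind⟩ := h4 (by simpa using hnil)
  have hc : l.foldl
      (fun (d : PySem.Dict String Int) ev => d.insert (pvKey ev) (d.getD (pvKey ev) 0 + 1))
      PySem.Dict.empty = PySem.Dict.counter (l.map pvKey) :=
    (portB_cnt l).trans (pvCnt_counter (l.map pvKey))
  have hitems : (PySem.Dict.counter (l.map pvKey)).items =
      (PySem.Set.ofList (l.map pvKey)).map (fun k => (k, ((l.map pvKey).count k : Int))) :=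
    PySem.Dict.items_counter (l.map pvKey)
  have hne : (PySem.Dict.counter (l.map pvKey)).items ≠ [] := by
    rw [hitems]
    intro h
    rcases List.map_eq_nil_iff.mp h with h'
    have : k0 ∈ PySem.Set.ofList (l.map pvKey) := (PySem.Set.mem_ofList _ _).mpr hk0mem
    rw [h'] at this
    cases this
  have hvals : (PySem.Dict.counter (l.map pvKey)).values =
      (PySem.Set.ofList (l.map pvKey)).map (fun k => ((l.map pvKey).count k : Int)) := by
    simp only [PySem.Dict.values, hitems, List.map_map]
    rfl
  have hmax : PySem.List.max? (PySem.Dict.counter (l.map pvKey)).values (fun v => v) =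
      some ((pvAFold (l.map pvKey)).2.2) := by
    rw [hvals]
    apply max?_eq_of_mem_of_le
    · exact List.mem_map.mpr ⟨k0, (PySem.Set.mem_ofList _ _).mpr hk0mem, hk0⟩
    · intro v hv
      obtain ⟨k, _, rfl⟩ := List.mem_map.mp hv
      exact h2 k
  simp only [compute_round_mvp_alt, hc]
  rw [if_neg hne, hmax]
  dsimp only
  rw [portB_scan, hfind]

-- ===== VERDICT (by name: the statement is the Claim_ definition above) =====
theorem compute_round_mvp_spec : Claim_equal_compute_round_mvp := by
  intro l _ _
  unfold Spec_compute_round_mvp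
  by_cases hnil : l = []
  · subst hnil; rfl
  · rw [portA_eq, altB_eq l hnil]
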